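-- pv_equiv track=rewrite | github.com/timothyschoen/CSD2a | python_music/multifunk.py | lengthgenerator
-- ===== SOURCE A (Python) =====
-- def lengthgenerator(list):
--     distlist = [0 for x in range(len(list))]
--     sum = 0
--     list = list[::-1]
--     for i in range(len(list)):
--         if list[i] != 0:
--             distlist[(len(list)-1)-i] = sum
--             sum = 0
--         else:
--             sum = sum+1
--     return distlist
-- ===== SOURCE B (Python) =====
-- def lengthgenerator(list):
--     n = len(list)
--     distlist = [0] * n
--     prev = None
--     for j, v in enumerate(list):
--         if v != 0:
--             if prev is not None:
--                 distlist[prev] = j - prev - 1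
--             prev = j
--     if prev is not None:
--         distlist[prev] = n - prev - 1
--     return distlist
-- ===== Notes on version B (the rewrite author's own statement) =====
-- stated objective: alternative
-- what changed: Replaces A's reverse-the-list scan with a running zero counter and mirrored index writes by a single forward scan that remembers the index of the previous nonzero and writes each gap (j - prev - 1) when the next nonzero is met, plus one post-loop write for trailing zeros.
import Mathlib
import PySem

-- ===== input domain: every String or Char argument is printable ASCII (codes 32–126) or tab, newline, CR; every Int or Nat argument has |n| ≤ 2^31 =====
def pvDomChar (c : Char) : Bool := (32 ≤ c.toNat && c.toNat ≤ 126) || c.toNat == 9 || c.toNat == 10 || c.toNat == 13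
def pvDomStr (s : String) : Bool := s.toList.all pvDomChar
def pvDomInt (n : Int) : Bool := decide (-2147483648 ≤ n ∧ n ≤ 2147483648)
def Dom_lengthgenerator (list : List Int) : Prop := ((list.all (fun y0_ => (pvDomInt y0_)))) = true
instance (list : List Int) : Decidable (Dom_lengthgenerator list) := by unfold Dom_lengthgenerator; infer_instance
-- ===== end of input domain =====

-- B replaces A's reversed scan (zero counter, mirrored writes) by a forward scan that
-- remembers the index of the previous nonzero; same cost, different decomposition (objective: alternative).

-- ===== PORT A =====
-- loop body of `for i in range(len(list))`: state = (distlist, sum, i); list[i] is the folded value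
def stepA (n : Nat) (st : List Int × Int × Nat) (v : Int) : List Int × Int × Nat :=
  if v ≠ 0 then (st.1.set ((n - 1) - st.2.2) st.2.1, 0, st.2.2 + 1)
  else (st.1, st.2.1 + 1, st.2.2 + 1)

def lengthgenerator (list : List Int) : List Int :=
  let distlist : List Int := List.replicate list.length 0  -- [0 for x in range(len(list))]
  let rev := list.reverse                                  -- list[::-1] (PySem.List.slice?_none_none_neg_one)
  (rev.foldl (stepA rev.length) (distlist, 0, 0)).1

-- ===== PORT B =====
-- loop body of `for j, v in enumerate(list)`: state = (distlist, prev, j)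
def stepB (st : List Int × Option Nat × Nat) (v : Int) : List Int × Option Nat × Nat :=
  if v ≠ 0 then
    ((match st.2.1 with
      | some p => st.1.set p ((st.2.2 : Int) - (p : Int) - 1)
      | none => st.1), some st.2.2, st.2.2 + 1)
  else (st.1, st.2.1, st.2.2 + 1)

def lengthgenerator_alt (list : List Int) : List Int :=
  let n := list.length
  let st := list.foldl stepB (List.replicate n 0, none, 0)
  match st.2.1 with
  | some p => st.1.set p ((n : Int) - (p : Int) - 1)
  | none => st.1

-- ===== PRECONDITION & SPEC =====
def Spec_lengthgenerator (list : List Int) (out : List Int) : Prop := out = lengthgenerator_alt list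
instance (list : List Int) (out : List Int) : Decidable (Spec_lengthgenerator list out) := by unfold Spec_lengthgenerator; infer_instance

-- ===== CLAIM (what is proved, stated in full; the proofs are below) =====
def Claim_equal_lengthgenerator : Prop := ∀ (list : List Int), Dom_lengthgenerator list → Spec_lengthgenerator list (lengthgenerator list)

-- ===== LEMMAS AND PROOFS =====

-- reference right-to-left recursion: (result list, count of leading zeros)
def fAux : List Int → List Int × Int
  | [] => ([], 0)
  | x :: t =>
    let q := fAux t
    if x ≠ 0 then (q.2 :: q.1, 0) else (0 :: q.1, q.2 + 1)

-- the post-loop finalisation of B, as a named function (defeq to the match in lengthgenerator_alt)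
def finishB (n : Nat) (st : List Int × Option Nat × Nat) : List Int :=
  match st.2.1 with
  | some p => st.1.set p ((n : Int) - (p : Int) - 1)
  | none => st.1

-- A side: pushing one cons through the fold (all indices written are < m, so the head survives)
theorem foldA_cons (ys : List Int) : ∀ (m : Nat) (d0 : Int) (dist : List Int) (sum : Int) (i : Nat),
    i + ys.length ≤ m →
    ys.foldl (stepA (m + 1)) (d0 :: dist, sum, i)
      = ((ys.foldl (stepA m) (dist, sum, i)).1.cons d0,
         (ys.foldl (stepA m) (dist, sum, i)).2) := by
  induction ys with
  | nil => intro m d0 dist sum i h; rfl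
  | cons y t ih =>
    intro m d0 dist sum i h
    simp only [List.foldl_cons, stepA]
    have hi : i < m := by simp at h; omega
    by_cases hy : y ≠ 0
    · simp only [if_pos hy]
      have h1 : (m + 1) - 1 - i = (m - 1 - i) + 1 := by omega
      rw [h1]
      simp only [List.set_cons_succ]
      exact ih m d0 _ 0 (i+1) (by simp at h ⊢; omega)
    · simp only [if_neg hy]
      exact ih m d0 dist (sum+1) (i+1) (by simp at h ⊢; omega)

theorem foldA_eq_fAux (xs : List Int) :
    xs.reverse.foldl (stepA xs.length) (List.replicate xs.length 0, 0, 0)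
      = ((fAux xs).1, (fAux xs).2, xs.length) := by
  induction xs with
  | nil => simp [fAux]
  | cons x t ih =>
    have hrev : (x :: t).reverse = t.reverse ++ [x] := by simp
    rw [hrev, List.foldl_append]
    have hlen : (x :: t).length = t.length + 1 := by simp
    rw [hlen]
    have hrepl : List.replicate (t.length + 1) (0:Int) = (0:Int) :: List.replicate t.length 0 := by
      simp [List.replicate_succ]
    rw [hrepl]
    rw [foldA_cons t.reverse t.length 0 _ 0 0 (by simp)]
    rw [ih]
    simp only [List.foldl_cons, List.foldl_nil, stepA, fAux]
    by_cases hx : x ≠ 0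
    · simp [hx]
    · simp [hx]

-- B side, prev = some p: scanned prefix is e (counter = e.length), untouched suffix is zeros
theorem foldB_some (ys : List Int) : ∀ (e : List Int) (p : Nat), p < e.length →
    finishB (e.length + ys.length)
        (ys.foldl stepB (e ++ List.replicate ys.length 0, some p, e.length))
      = e.set p ((e.length : Int) + (fAux ys).2 - (p : Int) - 1) ++ (fAux ys).1 := by
  induction ys with
  | nil => intro e p hp; simp [finishB, fAux]
  | cons y t ih =>
    intro e p hp
    simp only [List.foldl_cons, stepB]
    have hrepl : List.replicate (t.length + 1) (0:Int) = (0:Int) :: List.replicate t.length 0 := by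
      simp [List.replicate_succ]
    by_cases hy : y ≠ 0
    · simp only [if_pos hy]
      set v : Int := (e.length : Int) - (p : Int) - 1 with hv
      have hw : (e ++ List.replicate (y :: t).length (0:Int)).set p v
          = e.set p v ++ List.replicate (y :: t).length 0 :=
        List.set_append_left _ _ hp
      simp only [List.length_cons] at hw ⊢
      rw [hw, hrepl, show e.set p v ++ (0:Int) :: List.replicate t.length 0 = (e.set p v ++ [(0:Int)]) ++ List.replicate t.length 0 by simp]
      have hlen' : (e.set p v ++ [(0:Int)]).length = e.length + 1 := by simp
      have hn : e.length + (t.length + 1) = (e.set p v ++ [(0:Int)]).length + t.length := by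
        simp; omega
      rw [hn]
      have hcnt : e.length + 1 = (e.set p v ++ [(0:Int)]).length := by simp
      rw [hcnt]
      rw [ih (e.set p v ++ [(0:Int)]) e.length (by simp)]
      have hval : ((e.set p v ++ [(0:Int)]).length : Int) + (fAux t).2 - (e.length : Int) - 1
          = (fAux t).2 := by simp; ring
      rw [hval]
      have hset : (e.set p v ++ [(0:Int)]).set e.length (fAux t).2
          = e.set p v ++ [(fAux t).2] := by
        have : e.length = (e.set p v).length := by simp
        rw [this, List.set_append_right _ _ (le_refl _)]
        simp
      rw [hset]
      simp [fAux, hy]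
      rw [hv]
    · simp only [if_neg hy]
      simp only [List.length_cons]
      rw [hrepl, show e ++ (0:Int) :: List.replicate t.length 0
            = (e ++ [(0:Int)]) ++ List.replicate t.length 0 by simp]
      have hn : e.length + (t.length + 1) = (e ++ [(0:Int)]).length + t.length := by simp; try omega
      rw [hn]
      have hcnt : e.length + 1 = (e ++ [(0:Int)]).length := by simp
      rw [hcnt]
      rw [ih (e ++ [(0:Int)]) p (by simp; omega)]
      have hsetL : (e ++ [(0:Int)]).set p (((e ++ [(0:Int)]).length : Int) + (fAux t).2 - (p : Int) - 1)
          = e.set p (((e ++ [(0:Int)]).length : Int) + (fAux t).2 - (p : Int) - 1) ++ [(0:Int)] :=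
        List.set_append_left _ _ hp
      rw [hsetL]
      have hval : (((e ++ [(0:Int)]).length : Int) + (fAux t).2 - (p : Int) - 1)
          = ((e.length : Int) + (fAux (y :: t)).2 - (p : Int) - 1) := by
        simp [fAux, hy]; ring
      rw [hval]
      simp [fAux, hy]

-- B side, prev = none: no write has happened, no write is pending for e
theorem foldB_none (ys : List Int) : ∀ (e : List Int),
    finishB (e.length + ys.length)
        (ys.foldl stepB (e ++ List.replicate ys.length 0, none, e.length))
      = e ++ (fAux ys).1 := by
  induction ys with
  | nil => intro e; simp [finishB, fAux]
  | cons y t ih =>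
    intro e
    simp only [List.foldl_cons, stepB]
    have hrepl : List.replicate (t.length + 1) (0:Int) = (0:Int) :: List.replicate t.length 0 := by
      simp [List.replicate_succ]
    by_cases hy : y ≠ 0
    · simp only [if_pos hy]
      simp only [List.length_cons]
      rw [hrepl, show e ++ (0:Int) :: List.replicate t.length 0 = (e ++ [(0:Int)]) ++ List.replicate t.length 0 by simp]
      have hn : e.length + (t.length + 1) = (e ++ [(0:Int)]).length + t.length := by simp; omega
      rw [hn]
      have hcnt : e.length + 1 = (e ++ [(0:Int)]).length := by simp
      rw [hcnt]
      rw [foldB_some t (e ++ [(0:Int)]) e.length (by simp)]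
      have hset : (e ++ [(0:Int)]).set e.length (((e ++ [(0:Int)]).length : Int) + (fAux t).2 - (e.length : Int) - 1)
          = e ++ [(fAux t).2] := by
        rw [List.set_append_right _ _ (le_refl _)]
        simp
        ring
      rw [hset]
      simp [fAux, hy]
    · simp only [if_neg hy]
      simp only [List.length_cons]
      rw [hrepl, show e ++ (0:Int) :: List.replicate t.length 0
            = (e ++ [(0:Int)]) ++ List.replicate t.length 0 by simp]
      have hn : e.length + (t.length + 1) = (e ++ [(0:Int)]).length + t.length := by simp; try omega
      rw [hn]
      have hcnt : e.length + 1 = (e ++ [(0:Int)]).length := by simp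
      rw [hcnt, ih (e ++ [(0:Int)])]
      simp [fAux, hy]

-- ===== VERDICT (by name: the statement is the Claim_ definition above) =====
theorem lengthgenerator_spec : Claim_equal_lengthgenerator := by
  intro list _
  unfold Spec_lengthgenerator lengthgenerator lengthgenerator_alt
  simp only [List.length_reverse]
  rw [foldA_eq_fAux]
  have hb := foldB_none list []
  simp only [List.nil_append, List.length_nil, Nat.zero_add] at hb
  rw [show (list.foldl stepB (List.replicate list.length 0, none, 0)) =
        (list.foldl stepB (List.replicate list.length 0, none, 0)) from rfl]
  exact (hb ▸ rfl)
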